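-- pv_equiv track=rewrite | github.com/hxyshare/nlptools | codebase/utils/ngram_pattern.py | get_order_n_gram
-- ===== SOURCE A (Python) =====
-- def get_order_n_gram(sentence):
--     #sentence = sentence.split()
--
--     length = len(sentence)
--     order_n_gram_dict = {}
--     for i in range(length):
--         for j in range(i + 1,length):
--             tmp_string  = sentence[i] + sentence[j]
--             if tmp_string not in order_n_gram_dict:
--                 order_n_gram_dict[tmp_string] = 1
--             else:
--                 order_n_gram_dict[tmp_string] += 1
--             for k in range(j + 1,length):
--                 tmp_string  = sentence[i] + sentence[j] + sentence[k]
--                 if tmp_string not in order_n_gram_dict: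
--                     order_n_gram_dict[tmp_string] = 1
--
--                 else:
--                     order_n_gram_dict[tmp_string] += 1
--
--     return order_n_gram_dict
-- ===== SOURCE B (Python) =====
-- def _suffix_keys(first, rest):
--     """All keys whose n-gram starts with `first`, drawn from `rest` in order:
--     for each later word b, emit first+b and then first+b+c for every c after b."""
--     out = []
--     tail = rest
--     while tail:
--         b, tail = tail[0], tail[1:]
--         head = first + b
--         out.append(head)
--         out += [head + c for c in tail]
--     return out
--
--
-- def _keys(words):
--     """The full key stream, suffix by suffix."""
--     out = []
--     suffix = words
--     while suffix:
--         first, suffix = suffix[0], suffix[1:]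
--         out += _suffix_keys(first, suffix)
--     return out
--
--
-- def get_order_n_gram(sentence):
--     counts = {}
--     for key in _keys(sentence):
--         counts[key] = counts.get(key, 0) + 1
--     return counts
-- ===== Notes on version B (the rewrite author's own statement) =====
-- stated objective: alternative
-- what changed: A's single fused triple-indexed loop with a dict-membership branch is split into a pipeline: a structural suffix-by-suffix generator of the 2-/3-gram key stream (no index arithmetic) followed by one counting fold using dict.get.
import Mathlib
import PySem

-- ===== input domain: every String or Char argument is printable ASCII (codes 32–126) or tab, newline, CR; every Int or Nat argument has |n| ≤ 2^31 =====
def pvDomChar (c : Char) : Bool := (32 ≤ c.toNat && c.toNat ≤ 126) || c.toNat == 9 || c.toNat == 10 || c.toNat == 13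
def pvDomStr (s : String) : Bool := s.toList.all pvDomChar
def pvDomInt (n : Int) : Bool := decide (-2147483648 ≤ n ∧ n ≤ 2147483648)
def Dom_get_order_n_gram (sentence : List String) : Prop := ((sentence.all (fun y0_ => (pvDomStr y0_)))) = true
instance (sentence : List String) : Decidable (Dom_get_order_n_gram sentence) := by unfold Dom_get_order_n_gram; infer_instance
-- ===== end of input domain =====

-- B replaces A's fused triple-indexed loop with a pipeline (generate the key stream structurally, then one counting fold); alternative decomposition, no speed claim.

-- ===== PORT A =====
def get_order_n_gram (sentence : List String) : List (String × Int) :=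
  let length : Int := PySem.List.len sentence
  ((PySem.List.pyRange 0 length 1).foldl (fun d i =>
    (PySem.List.pyRange (i + 1) length 1).foldl (fun d j =>
      let tmp_string := PySem.List.pyGetD sentence i "" ++ PySem.List.pyGetD sentence j ""
      let d := if d.contains tmp_string = false then d.insert tmp_string 1
               else d.modify tmp_string 0 (· + 1)
      (PySem.List.pyRange (j + 1) length 1).foldl (fun d k =>
        let tmp_string := (PySem.List.pyGetD sentence i "" ++ PySem.List.pyGetD sentence j "")
                            ++ PySem.List.pyGetD sentence k ""
        if d.contains tmp_string = false then d.insert tmp_string 1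
        else d.modify tmp_string 0 (· + 1)) d) d)
    (PySem.Dict.empty : PySem.Dict String Int)).items

-- ===== PORT B =====
-- keys contributed with leading word `first`: for each later b, first+b then first+b+c for all c after b
def pvSuffixKeys (first : String) : List String → List String
  | [] => []
  | b :: tail =>
    let head := first ++ b
    (head :: tail.map (fun c => head ++ c)) ++ pvSuffixKeys first tail

-- the full key stream, suffix by suffix
def pvKeysB : List String → List String
  | [] => []
  | first :: suffix => pvSuffixKeys first suffix ++ pvKeysB suffix

def get_order_n_gram_alt (sentence : List String) : List (String × Int) :=
  ((pvKeysB sentence).foldl (fun counts key => counts.insert key (counts.getD key 0 + 1))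
    (PySem.Dict.empty : PySem.Dict String Int)).items

-- ===== PRECONDITION & SPEC =====
def Spec_get_order_n_gram (sentence : List String) (out : List (String × Int)) : Prop := out = get_order_n_gram_alt sentence
instance (sentence : List String) (out : List (String × Int)) : Decidable (Spec_get_order_n_gram sentence out) := by unfold Spec_get_order_n_gram; infer_instance

-- ===== CLAIM (what is proved, stated in full; the proofs are below) =====
def Claim_equal_get_order_n_gram : Prop := ∀ (sentence : List String), Dom_get_order_n_gram sentence → Spec_get_order_n_gram sentence (get_order_n_gram sentence)

-- ===== LEMMAS AND PROOFS =====

-- A's membership branch is exactly one Counter step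
lemma branch_eq_modify (d : PySem.Dict String Int) (k : String) :
    (if d.contains k = false then d.insert k 1 else d.modify k 0 (· + 1)) = d.modify k 0 (· + 1) := by
  by_cases h : d.contains k = false
  · simp [PySem.Dict.modify, PySem.Dict.getD_of_not_contains, h]
  · simp [h]

-- B's counting step is the same Counter step
lemma insert_getD_eq_modify (d : PySem.Dict String Int) (k : String) :
    d.insert k (d.getD k 0 + 1) = d.modify k 0 (· + 1) := by
  simp [PySem.Dict.modify]

-- triples for a fixed prefix: the index loop is a map over the dropped tail
lemma trip_eq (s : List String) (pre : String) (t : Nat) :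
    (PySem.List.pyRange (t : Int) (PySem.List.len s) 1).map
        (fun k => pre ++ PySem.List.pyGetD s k "")
      = (s.drop t).map (fun c => pre ++ c) := by
  have h := PySem.List.map_pyGetD_pyRange (xs := s) (a := (t : Int)) (d := "") (by positivity)
  calc (PySem.List.pyRange (t : Int) (PySem.List.len s) 1).map (fun k => pre ++ PySem.List.pyGetD s k "")
      = ((PySem.List.pyRange (t : Int) (PySem.List.len s) 1).map (fun k => PySem.List.pyGetD s k "")).map (fun v => pre ++ v) := by
        rw [List.map_map]; rfl
    _ = (s.drop t).map (fun c => pre ++ c) := by rw [h]; simp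

-- the j-level stream from position t is pvSuffixKeys on the dropped tail
lemma suff_eq (s : List String) (a : String) (t : Nat) (ht : t ≤ s.length) :
    (PySem.List.pyRange (t : Int) (PySem.List.len s) 1).flatMap
        (fun j => (a ++ PySem.List.pyGetD s j "") ::
          (PySem.List.pyRange (j + 1) (PySem.List.len s) 1).map
            (fun k => (a ++ PySem.List.pyGetD s j "") ++ PySem.List.pyGetD s k ""))
      = pvSuffixKeys a (s.drop t) := by
  by_cases h : t < s.length
  · have hcons : PySem.List.pyRange (t : Int) (PySem.List.len s) 1
        = (t : Int) :: PySem.List.pyRange ((t : Int) + 1) (PySem.List.len s) 1 := by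
      apply PySem.List.pyRange_one_cons; simp [PySem.List.len_eq]; exact_mod_cast h
    have hget : PySem.List.pyGetD s (t : Int) "" = s[t] := by
      rw [PySem.List.pyGetD_eq_getElem] <;> simp [h]
    have hdrop : s.drop t = s[t] :: s.drop (t + 1) := List.drop_eq_getElem_cons h
    have hcast : ((t : Int) + 1) = ((t + 1 : Nat) : Int) := by push_cast; ring
    rw [hcons, List.flatMap_cons, hcast, suff_eq s a (t + 1) h, hdrop]
    simp only [pvSuffixKeys, hget, trip_eq s (a ++ s[t]) (t + 1)]
  · have ht' : t = s.length := le_antisymm ht (le_of_not_gt h)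
    have hnil : PySem.List.pyRange (t : Int) (PySem.List.len s) 1 = [] := by
      apply PySem.List.pyRange_one_eq_nil; simp [PySem.List.len_eq, ht']
    rw [hnil]; simp [ht', pvSuffixKeys]
termination_by s.length - t

-- the i-level stream from position t is pvKeysB on the dropped tail
lemma keys_eq (s : List String) (t : Nat) (ht : t ≤ s.length) :
    (PySem.List.pyRange (t : Int) (PySem.List.len s) 1).flatMap
        (fun i => (PySem.List.pyRange (i + 1) (PySem.List.len s) 1).flatMap
          (fun j => (PySem.List.pyGetD s i "" ++ PySem.List.pyGetD s j "") ::
            (PySem.List.pyRange (j + 1) (PySem.List.len s) 1).map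
              (fun k => (PySem.List.pyGetD s i "" ++ PySem.List.pyGetD s j "") ++ PySem.List.pyGetD s k "")))
      = pvKeysB (s.drop t) := by
  by_cases h : t < s.length
  · have hcons : PySem.List.pyRange (t : Int) (PySem.List.len s) 1
        = (t : Int) :: PySem.List.pyRange ((t : Int) + 1) (PySem.List.len s) 1 := by
      apply PySem.List.pyRange_one_cons; simp [PySem.List.len_eq]; exact_mod_cast h
    have hget : PySem.List.pyGetD s (t : Int) "" = s[t] := by
      rw [PySem.List.pyGetD_eq_getElem] <;> simp [h]
    have hdrop : s.drop t = s[t] :: s.drop (t + 1) := List.drop_eq_getElem_cons h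
    have hcast : ((t : Int) + 1) = ((t + 1 : Nat) : Int) := by push_cast; ring
    rw [hcons, List.flatMap_cons, hcast, keys_eq s (t + 1) h, hdrop]
    simp only [pvKeysB, hget]
    rw [suff_eq s (s[t]) (t + 1) h]
  · have ht' : t = s.length := le_antisymm ht (le_of_not_gt h)
    have hnil : PySem.List.pyRange (t : Int) (PySem.List.len s) 1 = [] := by
      apply PySem.List.pyRange_one_eq_nil; simp [PySem.List.len_eq, ht']
    rw [hnil]; simp [ht', pvKeysB]
termination_by s.length - t

-- a nested fold over a flatMap-shaped stream is the fold over the flat stream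
lemma foldl_flatMap_eq {α β γ : Type} (l : List α) (g : α → List β) (f : γ → β → γ) (init : γ) :
    l.foldl (fun acc x => (g x).foldl f acc) init = (l.flatMap g).foldl f init := by
  rw [List.flatMap, List.foldl_flatten, List.foldl_map]

-- A's nested Counter-step folds are B's one fold over the key stream
lemma dictA_eq (s : List String) :
    (PySem.List.pyRange 0 (PySem.List.len s) 1).foldl (fun d i =>
      (PySem.List.pyRange (i + 1) (PySem.List.len s) 1).foldl (fun d j =>
        (PySem.List.pyRange (j + 1) (PySem.List.len s) 1).foldl (fun d k =>
          d.modify ((PySem.List.pyGetD s i "" ++ PySem.List.pyGetD s j "") ++ PySem.List.pyGetD s k "") 0 (· + 1))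
          (d.modify (PySem.List.pyGetD s i "" ++ PySem.List.pyGetD s j "") 0 (· + 1))) d)
      (PySem.Dict.empty : PySem.Dict String Int)
    = (pvKeysB s).foldl (fun d key => d.modify key 0 (· + 1)) PySem.Dict.empty := by
  have h0 := keys_eq s 0 (Nat.zero_le _)
  rw [Nat.cast_zero, List.drop_zero] at h0
  rw [← h0, ← foldl_flatMap_eq]
  apply PySem.List.foldl_congr_mem
  intro d i _
  rw [← foldl_flatMap_eq]
  apply PySem.List.foldl_congr_mem
  intro d' j _
  rw [List.foldl_cons, List.foldl_map]

-- ===== VERDICT (by name: the statement is the Claim_ definition above) =====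
theorem get_order_n_gram_spec : Claim_equal_get_order_n_gram := by
  intro s _
  show get_order_n_gram s = get_order_n_gram_alt s
  unfold get_order_n_gram get_order_n_gram_alt
  simp only [branch_eq_modify, insert_getD_eq_modify]
  rw [dictA_eq]
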